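-- pv_equiv track=rewrite | github.com/kasmith/cbmm-project-christmas | ContainmentModels/hulls.py | findMinY
-- ===== SOURCE A (Python) =====
-- def findMinY(ptlist):
--     ys = [p[1] for p in ptlist]
--     miny = min(ys)
--     minpts = [p for p in ptlist if p[1] == miny]
--     if len(minpts) == 1: return minpts[0]
--     else:
--         minxs = [p[0] for p in minpts]
--         minx = min(minxs)
--         idx = minxs.index(minx)
--         return minpts[idx]
-- ===== SOURCE B (Python) =====
-- def findMinY(ptlist):
--     return min(ptlist, key=lambda p: (p[1], p[0]))
-- ===== Notes on version B (the rewrite author's own statement) =====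
-- stated objective: idiomatic
-- what changed: Replaces the multi-pass filter/min/index pipeline with a single keyed min over (y, x), removing the intermediate ys/minpts/minxs lists, the length branch and the .index lookup.
import Mathlib
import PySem

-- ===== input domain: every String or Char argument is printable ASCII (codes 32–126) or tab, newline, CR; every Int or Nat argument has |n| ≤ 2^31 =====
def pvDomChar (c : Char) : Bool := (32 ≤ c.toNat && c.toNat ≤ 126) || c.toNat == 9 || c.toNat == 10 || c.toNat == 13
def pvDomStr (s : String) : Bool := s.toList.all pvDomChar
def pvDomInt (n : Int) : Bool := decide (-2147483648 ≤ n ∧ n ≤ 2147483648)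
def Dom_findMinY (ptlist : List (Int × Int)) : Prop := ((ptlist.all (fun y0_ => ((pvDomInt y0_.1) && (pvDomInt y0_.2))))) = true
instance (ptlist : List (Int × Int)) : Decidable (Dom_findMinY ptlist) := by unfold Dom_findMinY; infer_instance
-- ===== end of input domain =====

-- B replaces A's multi-pass min/filter/index pipeline with a single keyed min over (y, x); objective: idiomatic.


-- ===== PORT A =====
def findMinY (ptlist : List (Int × Int)) : Int × Int :=
  let ys := ptlist.map (fun p => p.2)
  let miny := (PySem.List.min? ys (fun y => y)).getD 0
  let minpts := ptlist.filter (fun p => p.2 == miny)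
  if PySem.List.len minpts == 1 then
    PySem.List.pyGetD minpts 0 (0, 0)
  else
    let minxs := minpts.map (fun p => p.1)
    let minx := (PySem.List.min? minxs (fun y => y)).getD 0
    let idx := (PySem.List.index? minxs minx).getD 0
    PySem.List.pyGetD minpts (idx : Int) (0, 0)

-- ===== PORT B =====
def findMinY_alt (ptlist : List (Int × Int)) : Int × Int :=
  (PySem.List.min2? ptlist (fun p => p.2) (fun p => p.1)).getD (0, 0)

-- ===== PRECONDITION & SPEC =====
-- On the empty list both Pythons raise ValueError (min of an empty sequence); Pre_ excludes exactly that.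
def Pre_findMinY (ptlist : List (Int × Int)) : Prop := ptlist ≠ []
instance (ptlist : List (Int × Int)) : Decidable (Pre_findMinY ptlist) := by unfold Pre_findMinY; infer_instance
def pvWitness_findMinY : (List (Int × Int)) := [(2, 1), (0, 1), (5, 0)]

def Spec_findMinY (ptlist : List (Int × Int)) (out : Int × Int) : Prop := out = findMinY_alt ptlist
instance (ptlist : List (Int × Int)) (out : Int × Int) : Decidable (Spec_findMinY ptlist out) := by unfold Spec_findMinY; infer_instance

-- ===== CLAIM (what is proved, stated in full; the proofs are below) =====
def Claim_equal_findMinY : Prop := ∀ (ptlist : List (Int × Int)), Dom_findMinY ptlist → Pre_findMinY ptlist → Spec_findMinY ptlist (findMinY ptlist)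

-- ===== LEMMAS AND PROOFS =====

-- The step function of B's keyed min, on pair keys (y, x).
def pvStep (m x : Int × Int) : Int × Int :=
  if x.2 < m.2 ∨ (¬ m.2 < x.2 ∧ x.1 < m.1) then x else m

def pvBest (a : Int × Int) (t : List (Int × Int)) : Int × Int := t.foldl pvStep a

-- lexicographic ≤ on (y, x)
def pvLexLe (m y : Int × Int) : Prop := m.2 < y.2 ∨ (m.2 = y.2 ∧ m.1 ≤ y.1)

lemma min2?_cons_eq_best (t : List (Int × Int)) (a : Int × Int) :
    PySem.List.min2? (a :: t) (fun p => p.2) (fun p => p.1) = some (pvBest a t) := by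
  induction t generalizing a with
  | nil => rfl
  | cons x t ih =>
    have hstep : PySem.List.min2? (a :: x :: t) (fun p => p.2) (fun p => p.1)
        = PySem.List.min2? (pvStep a x :: t) (fun p => p.2) (fun p => p.1) := by
      show List.foldl _ (if (decide (x.2 < a.2) || !decide (a.2 < x.2) && decide (x.1 < a.1)) = true
          then some x else some a) t = List.foldl _ (some (pvStep a x)) t
      congr 1
      split_ifs with h
      · simp only [Bool.or_eq_true, Bool.and_eq_true, Bool.not_eq_true', decide_eq_true_eq,
          decide_eq_false_iff_not] at h
        simp only [pvStep]
        rw [if_pos h]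
      · simp only [Bool.or_eq_true, Bool.and_eq_true, Bool.not_eq_true', decide_eq_true_eq,
          decide_eq_false_iff_not, not_or, not_and, not_lt] at h
        simp only [pvStep]
        rw [if_neg (by omega)]
    rw [hstep, ih]
    simp [pvBest]

lemma pvStep_cases (a x : Int × Int) : pvStep a x = x ∨ pvStep a x = a := by
  unfold pvStep; split_ifs <;> simp

lemma pvBest_mem (t : List (Int × Int)) (a : Int × Int) : pvBest a t = a ∨ pvBest a t ∈ t := by
  induction t generalizing a with
  | nil => simp [pvBest]
  | cons x t ih =>
    have hb : pvBest a (x :: t) = pvBest (pvStep a x) t := by simp [pvBest]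
    rw [hb]
    rcases pvStep_cases a x with hs | hs <;> rw [hs] <;>
      [rcases ih x with h | h; rcases ih a with h | h] <;> simp [h]

lemma pvBest_le (t : List (Int × Int)) (a : Int × Int) :
    pvLexLe (pvBest a t) a ∧ ∀ y ∈ t, pvLexLe (pvBest a t) y := by
  induction t generalizing a with
  | nil => exact ⟨Or.inr ⟨rfl, le_refl _⟩, by simp⟩
  | cons x t ih =>
    have hb : pvBest a (x :: t) = pvBest (pvStep a x) t := by simp [pvBest]
    rw [hb]
    by_cases hc : x.2 < a.2 ∨ (¬ a.2 < x.2 ∧ x.1 < a.1)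
    · have hs : pvStep a x = x := by simp only [pvStep]; rw [if_pos hc]
      obtain ⟨h1, h2⟩ := ih x
      rw [hs]
      refine ⟨?_, fun y hy => ?_⟩
      · unfold pvLexLe at h1 ⊢; omega
      · rcases List.mem_cons.mp hy with rfl | hy
        · exact h1
        · exact h2 y hy
    · have hs : pvStep a x = a := by simp only [pvStep]; rw [if_neg hc]
      obtain ⟨h1, h2⟩ := ih a
      rw [hs]
      push Not at hc
      refine ⟨h1, fun y hy => ?_⟩
      rcases List.mem_cons.mp hy with rfl | hy
      · unfold pvLexLe at h1 ⊢; omega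
      · exact h2 y hy

-- pvBest a t is the FIRST element of a :: t with its (y, x) key.
lemma pvBest_eq_find (t : List (Int × Int)) (a : Int × Int) :
    (a :: t).find? (fun p => p.2 == (pvBest a t).2 && p.1 == (pvBest a t).1) = some (pvBest a t) := by
  induction t generalizing a with
  | nil => simp [pvBest]
  | cons x t ih =>
    have hb : pvBest a (x :: t) = pvBest (pvStep a x) t := by simp [pvBest]
    obtain ⟨hle1, _⟩ := pvBest_le t (pvStep a x)
    have ihx := ih (pvStep a x)
    rw [hb]
    by_cases hc : x.2 < a.2 ∨ (¬ a.2 < x.2 ∧ x.1 < a.1)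
    · -- x strictly below a: accumulator becomes x; a's key is strictly above the best's
      have hs : pvStep a x = x := by simp only [pvStep]; rw [if_pos hc]
      rw [hs] at hle1 ihx ⊢
      rw [List.find?_cons_of_neg]
      · exact ihx
      · unfold pvLexLe at hle1
        simp only [Bool.and_eq_true, beq_iff_eq, not_and]
        omega
    · -- accumulator stays a
      have hs : pvStep a x = a := by simp only [pvStep]; rw [if_neg hc]
      rw [hs] at hle1 ihx ⊢
      push Not at hc
      by_cases ha : a.2 = (pvBest a t).2 ∧ a.1 = (pvBest a t).1
      · rw [List.find?_cons_of_pos (by simp [ha.1, ha.2])]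
        rw [List.find?_cons_of_pos (by simp [ha.1, ha.2])] at ihx
        exact ihx
      · rw [List.find?_cons_of_neg (by simpa using ha)]
        rw [List.find?_cons_of_neg (by simpa using ha)] at ihx
        rw [List.find?_cons_of_neg]
        · exact ihx
        · -- if x had the best key, then a would too (a between x and best lexicographically)
          unfold pvLexLe at hle1
          simp only [Bool.and_eq_true, beq_iff_eq, not_and]
          intro hx2 hx1
          exfalso
          exact ha ⟨by omega, by omega⟩

-- first match of x-coordinate via index? into the list itself
lemma pyGetD_index?_fst (l : List (Int × Int)) (v : Int) (m : Int × Int) (d : Int × Int)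
    (h : l.find? (fun p => p.1 == v) = some m) :
    PySem.List.pyGetD l (((PySem.List.index? (l.map (fun p => p.1)) v).getD 0 : Nat) : Int) d = m := by
  induction l with
  | nil => simp at h
  | cons p l ih =>
    by_cases hp : p.1 = v
    · rw [List.find?_cons_of_pos (by simp [hp])] at h
      have hm : p = m := by simpa using h
      rw [List.map_cons, hp, PySem.List.index?_cons_self]
      simp [PySem.List.pyGetD_zero_cons, hm]
    · rw [List.find?_cons_of_neg (by simp [hp])] at h
      have hmem : v ∈ l.map (fun p => p.1) := by
        have h1 := List.find?_some h
        have hm := List.mem_of_find?_eq_some h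
        simp only [beq_iff_eq] at h1
        exact List.mem_map.mpr ⟨m, hm, h1⟩
      obtain ⟨j, hj⟩ := Option.isSome_iff_exists.mp ((PySem.List.index?_isSome_iff _ _).mpr hmem)
      have hrec := ih h
      rw [hj] at hrec
      rw [List.map_cons, PySem.List.index?_cons_of_ne _ hp, hj]
      simp only [Option.map_some, Option.getD_some] at hrec ⊢
      rw [PySem.List.pyGetD_natCast] at hrec ⊢
      simpa using hrec

-- ===== VERDICT (by name: the statement is the Claim_ definition above) =====
theorem findMinY_spec : Claim_equal_findMinY := by
  intro ptlist _ hpre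
  simp only [Spec_findMinY, findMinY, findMinY_alt]
  obtain ⟨a, t, rfl⟩ : ∃ a t, ptlist = a :: t := by
    cases ptlist with
    | nil => exact absurd rfl hpre
    | cons a t => exact ⟨a, t, rfl⟩
  rw [min2?_cons_eq_best]
  set m := pvBest a t with hm
  obtain ⟨hle_a, hle_t⟩ := pvBest_le t a
  have hmem : m ∈ a :: t := by
    rw [hm]
    rcases pvBest_mem t a with h | h
    · rw [h]; exact List.mem_cons_self
    · exact List.mem_cons_of_mem a h
  have hle : ∀ y ∈ a :: t, pvLexLe m y := by
    intro y hy
    rcases List.mem_cons.mp hy with rfl | h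
    · exact hle_a
    · exact hle_t y h
  -- miny = m.2
  have hmin? : ∃ v, PySem.List.min? ((a :: t).map (fun p => p.2)) (fun y => y) = some v := by
    have : PySem.List.min? ((a :: t).map (fun p => p.2)) (fun y => y) ≠ none := by
      simp [PySem.List.min?_eq_none_iff]
    exact Option.ne_none_iff_exists'.mp this
  obtain ⟨v, hv⟩ := hmin?
  have hv_mem := PySem.List.min?_mem hv
  have hv_min := PySem.List.min?_isMin hv
  have hveq : v = m.2 := by
    have h1 : v ≤ m.2 := hv_min m.2 (List.mem_map.mpr ⟨m, hmem, rfl⟩)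
    obtain ⟨q, hq, hq2⟩ := List.mem_map.mp hv_mem
    have h2 := hle q hq
    unfold pvLexLe at h2; omega
  rw [hv, Option.getD_some, hveq]
  set minpts := (a :: t).filter (fun p => p.2 == m.2) with hmp
  have hm_mp : m ∈ minpts := List.mem_filter.mpr ⟨hmem, by simp⟩
  -- the find? characterisation, pushed through the filter
  have hfind : minpts.find? (fun p => p.1 == m.1) = some m := by
    rw [hmp, List.find?_filter]
    have := pvBest_eq_find t a
    rw [← hm] at this
    simpa [Bool.and_comm] using this
  by_cases hlen : PySem.List.len minpts == 1
  · -- a single min-y point: it is m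
    simp only [hlen, if_true]
    have h1 : minpts.length = 1 := by
      simp only [beq_iff_eq, PySem.List.len_eq] at hlen; exact_mod_cast hlen
    obtain ⟨q, hq⟩ := List.length_eq_one_iff.mp h1
    rw [hq] at hm_mp
    simp only [List.mem_singleton] at hm_mp
    rw [hq, ← hm_mp]
    simp [PySem.List.pyGetD_zero_cons]
  · simp only [hlen, if_false, Bool.false_eq_true]
    -- minx = m.1
    have hmp_ne : minpts ≠ [] := by intro h; rw [h] at hm_mp; simp at hm_mp
    have hminx? : ∃ w, PySem.List.min? (minpts.map (fun p => p.1)) (fun y => y) = some w := by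
      have : PySem.List.min? (minpts.map (fun p => p.1)) (fun y => y) ≠ none := by
        simp [PySem.List.min?_eq_none_iff, hmp_ne]
      exact Option.ne_none_iff_exists'.mp this
    obtain ⟨w, hw⟩ := hminx?
    have hw_mem := PySem.List.min?_mem hw
    have hw_min := PySem.List.min?_isMin hw
    have hweq : w = m.1 := by
      have h1 : w ≤ m.1 := hw_min m.1 (List.mem_map.mpr ⟨m, hm_mp, rfl⟩)
      obtain ⟨q, hq, hq2⟩ := List.mem_map.mp hw_mem
      have hq_mem : q ∈ a :: t := (List.mem_filter.mp hq).1
      have hq_y : q.2 = m.2 := by have := (List.mem_filter.mp hq).2; simpa using this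
      have h2 := hle q hq_mem
      unfold pvLexLe at h2; omega
    rw [hw, Option.getD_some, hweq]
    exact pyGetD_index?_fst minpts m.1 m (0, 0) hfind
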